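-- pv_equiv track=rewrite | github.com/estnltk/estnltk | estnltk/dividing.py | list_translates_span
-- ===== SOURCE A (Python) =====
-- def span_contains_span(outer, inner):
--     return outer[0] <= inner[0] and outer[1] >= inner[1]
--
-- def list_translates_span(outer, inner, sep):
--     offset = 0
--     seplen = len(sep)
--     for span in outer:
--         if span_contains_span(span, inner):
--             outer_left = first(span)
--             return inner[0]-outer_left+offset, inner[1]-outer_left+offset
--         offset += span[1]-span[0] + seplen
--
-- def first(span):
--     if isinstance(span, list):
--         return span[0][0]
--     return span[0]
-- ===== SOURCE B (Python) =====
-- def span_contains_span(outer, inner):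
--     return outer[0] <= inner[0] and outer[1] >= inner[1]
--
-- def list_translates_span(outer, inner, sep):
--     # Recursive: translate relative to the remaining list, shifting on the way
--     # back OUT of the recursion instead of accumulating an offset going in.
--     if not outer:
--         return None
--     head, rest = outer[0], outer[1:]
--     if span_contains_span(head, inner):
--         left = head[0]
--         return inner[0] - left, inner[1] - left
--     res = list_translates_span(rest, inner, sep)
--     if res is None:
--         return None
--     shift = head[1] - head[0] + len(sep)
--     return res[0] + shift, res[1] + shift
-- ===== Notes on version B (the rewrite author's own statement) =====
-- stated objective: alternative
-- what changed: B is recursive on the span list and shifts the translated pair by the head span's width+seplen on the way back out of the recursion, instead of A's forward loop that accumulates the offset before the match.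
import Mathlib
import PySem

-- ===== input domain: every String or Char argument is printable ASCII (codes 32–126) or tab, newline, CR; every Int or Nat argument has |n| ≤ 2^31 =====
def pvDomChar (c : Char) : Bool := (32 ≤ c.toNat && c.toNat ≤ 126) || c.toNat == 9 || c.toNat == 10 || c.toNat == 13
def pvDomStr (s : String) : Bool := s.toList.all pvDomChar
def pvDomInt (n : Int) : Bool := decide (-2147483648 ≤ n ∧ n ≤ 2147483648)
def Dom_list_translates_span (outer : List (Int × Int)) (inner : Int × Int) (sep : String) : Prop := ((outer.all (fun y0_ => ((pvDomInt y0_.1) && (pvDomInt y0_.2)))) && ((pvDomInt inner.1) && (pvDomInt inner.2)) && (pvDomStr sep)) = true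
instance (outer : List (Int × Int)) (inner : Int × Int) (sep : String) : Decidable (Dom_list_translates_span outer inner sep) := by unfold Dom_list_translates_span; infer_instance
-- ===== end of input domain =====

-- B recurses on the span list and shifts the translated pair on the way OUT of the recursion (alternative decomposition; same O(n) cost).

-- ===== PORT A =====
-- span_contains_span(outer, inner)
def span_contains_span (outer : Int × Int) (inner : Int × Int) : Bool :=
  decide (outer.1 ≤ inner.1) && decide (outer.2 ≥ inner.2)

-- first(span): on (Int × Int) spans the isinstance(span, list) branch never fires
def pyFirst (span : Int × Int) : Int := span.1

-- the 'for span in outer' loop with accumulator offset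
def ltsLoopA (inner : Int × Int) (seplen : Int) : List (Int × Int) → Int → Option (Int × Int)
  | [], _ => none
  | span :: rest, offset =>
    if span_contains_span span inner then
      some (inner.1 - pyFirst span + offset, inner.2 - pyFirst span + offset)
    else
      ltsLoopA inner seplen rest (offset + (span.2 - span.1 + seplen))

def list_translates_span (outer : List (Int × Int)) (inner : Int × Int) (sep : String) : Option (Int × Int) :=
  ltsLoopA inner (PySem.Str.len sep) outer 0

-- ===== PORT B =====
-- recursion over the list; the shift is applied to the recursive result on the way out
def ltsRecB (inner : Int × Int) (sep : String) : List (Int × Int) → Option (Int × Int)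
  | [] => none
  | head :: rest =>
    if span_contains_span head inner then
      some (inner.1 - head.1, inner.2 - head.1)
    else
      match ltsRecB inner sep rest with
      | none => none
      | some r => some (r.1 + (head.2 - head.1 + PySem.Str.len sep), r.2 + (head.2 - head.1 + PySem.Str.len sep))

def list_translates_span_alt (outer : List (Int × Int)) (inner : Int × Int) (sep : String) : Option (Int × Int) :=
  ltsRecB inner sep outer

-- ===== PRECONDITION & SPEC =====
def Spec_list_translates_span (outer : List (Int × Int)) (inner : Int × Int) (sep : String) (out : Option (Int × Int)) : Prop := out = list_translates_span_alt outer inner sep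
instance (outer : List (Int × Int)) (inner : Int × Int) (sep : String) (out : Option (Int × Int)) : Decidable (Spec_list_translates_span outer inner sep out) := by unfold Spec_list_translates_span; infer_instance

-- ===== CLAIM =====
def Claim_equal_list_translates_span : Prop := ∀ (outer : List (Int × Int)) (inner : Int × Int) (sep : String), Dom_list_translates_span outer inner sep → Spec_list_translates_span outer inner sep (list_translates_span outer inner sep)

-- ===== LEMMAS AND PROOFS =====

-- A's loop with accumulator off equals B's recursion shifted by off
lemma ltsLoopA_eq_rec (inner : Int × Int) (sep : String) :
    ∀ (l : List (Int × Int)) (off : Int),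
      ltsLoopA inner (PySem.Str.len sep) l off =
        Option.map (fun p : Int × Int => (p.1 + off, p.2 + off)) (ltsRecB inner sep l) := by
  intro l
  induction l with
  | nil => intro off; simp [ltsLoopA, ltsRecB]
  | cons s rest ih =>
    intro off
    by_cases h : span_contains_span s inner = true
    · simp only [ltsLoopA, ltsRecB, h, if_pos, pyFirst, Option.map_some]
    · simp only [ltsLoopA, ltsRecB, h, Bool.false_eq_true, if_neg, not_false_eq_true]
      rw [ih]
      cases hr : ltsRecB inner sep rest with
      | none => simp
      | some r =>
        simp only [Option.map_some, Option.some.injEq, Prod.mk.injEq]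
        constructor <;> ring

-- ===== VERDICT =====
theorem list_translates_span_spec : Claim_equal_list_translates_span := by
  intro outer inner sep _
  unfold Spec_list_translates_span list_translates_span list_translates_span_alt
  rw [ltsLoopA_eq_rec]
  cases h : ltsRecB inner sep outer <;> simp
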